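-- pv_equiv track=rewrite | github.com/EROStxm/python | EjercicioN1.py | clasica
-- ===== SOURCE A (Python) =====
-- def clasica(w):
--     p = 1; t = 1
--     k=0
--     for i in range(1, w+1, 1):
--         k = t
--         p = p + 1
--         if p > t:
--             p = 1
--             t = t + 1
--     return k
-- ===== SOURCE B (Python) =====
-- def clasica(w):
--     # index after w diagonal steps = smallest t with t*(t+1)//2 >= w (0 for w <= 0),
--     # found by binary search instead of stepping w times
--     lo = 0
--     hi = w if w > 0 else 0
--     while lo < hi:
--         mid = (lo + hi) // 2
--         if mid * (mid + 1) // 2 >= w: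
--             hi = mid
--         else:
--             lo = mid + 1
--     return lo
-- ===== Notes on version B (the rewrite author's own statement) =====
-- stated objective: faster
-- what changed: Replaced the w-step counter simulation with a binary search for the smallest t with t*(t+1)/2 >= w.
import Mathlib
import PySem

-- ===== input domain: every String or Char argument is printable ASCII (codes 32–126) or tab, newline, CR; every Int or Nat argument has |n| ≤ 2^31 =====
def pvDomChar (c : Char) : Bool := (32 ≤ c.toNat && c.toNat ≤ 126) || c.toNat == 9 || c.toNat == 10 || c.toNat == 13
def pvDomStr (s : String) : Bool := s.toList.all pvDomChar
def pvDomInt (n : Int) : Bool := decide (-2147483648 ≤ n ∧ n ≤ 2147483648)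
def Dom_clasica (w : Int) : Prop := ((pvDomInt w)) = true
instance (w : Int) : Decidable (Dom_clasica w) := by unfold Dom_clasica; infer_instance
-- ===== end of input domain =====

-- B replaces A's w-step counter simulation by a binary search for the smallest t
-- with t*(t+1)//2 >= w (objective: faster, O(log w) instead of O(w) iterations).

-- ===== PORT A =====
-- one iteration of A's for-loop body on the state (p, t, k)
def clasicaStep (st : Int × Int × Int) (_i : Int) : Int × Int × Int :=
  match st with
  | (p, t, _) =>
    let k := t
    let p := p + 1
    if p > t then (1, t + 1, k) else (p, t, k)

def clasica (w : Int) : Int :=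
  ((PySem.List.pyRange 1 (w + 1) 1).foldl clasicaStep (1, 1, 0)).2.2

-- ===== PORT B =====
-- the while-loop of Source B (terminates because hi - lo strictly shrinks)
def clasicaLoop (w lo hi : Int) : Int :=
  if h : lo < hi then
    let mid := PySem.Int.floordiv (lo + hi) 2
    if w ≤ PySem.Int.floordiv (mid * (mid + 1)) 2 then clasicaLoop w lo mid
    else clasicaLoop w (mid + 1) hi
  else lo
termination_by (hi - lo).toNat
decreasing_by
  · have he : PySem.Int.floordiv (lo + hi) 2 = (lo + hi) / 2 :=
      PySem.Int.floordiv_eq_ediv_of_pos (by norm_num)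
    omega
  · have he : PySem.Int.floordiv (lo + hi) 2 = (lo + hi) / 2 :=
      PySem.Int.floordiv_eq_ediv_of_pos (by norm_num)
    omega

def clasica_alt (w : Int) : Int := clasicaLoop w 0 (if w > 0 then w else 0)

-- ===== PRECONDITION & SPEC =====
def Spec_clasica (w : Int) (out : Int) : Prop := out = clasica_alt w
instance (w : Int) (out : Int) : Decidable (Spec_clasica w out) := by unfold Spec_clasica; infer_instance

-- ===== CLAIM (what is proved, stated in full; the proofs are below) =====
def Claim_equal_clasica : Prop := ∀ (w : Int), Dom_clasica w → Spec_clasica w (clasica w)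

-- ===== LEMMAS AND PROOFS =====

-- Invariant of A's fold over range(1, n+1): with s, r the triangular numbers of k, t
-- (2*s = k*(k+1), 2*r = t*(t+1)), k is the least index whose triangular number reaches n.
lemma clasica_fold_inv (n : Nat) (hn : 1 ≤ n) :
    ∃ p t k r s : Int,
      (PySem.List.pyRange 1 ((n : Int) + 1) 1).foldl clasicaStep (1, 1, 0) = (p, t, k) ∧
      2 * r = t * (t + 1) ∧ 2 * s = k * (k + 1) ∧
      p = (n : Int) + 1 - (r - t) ∧ 1 ≤ p ∧ p ≤ t ∧ 1 ≤ t ∧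
      1 ≤ k ∧ (n : Int) ≤ s ∧ s - k < (n : Int) := by
  induction n with
  | zero => omega
  | succ m ih =>
    rcases Nat.eq_or_lt_of_le hn with h1 | h1
    · -- m + 1 = 1 : one iteration from (1,1,0)
      have hm : m = 0 := by omega
      subst hm
      refine ⟨1, 2, 1, 3, 1, ?_, by ring, by ring, by norm_num, by norm_num,
        by norm_num, by norm_num, by norm_num, by norm_num, by norm_num⟩
      have h12 : PySem.List.pyRange 1 (((1 : Nat) : Int) + 1) 1 = [1] := by decide
      rw [h12]
      simp [List.foldl, clasicaStep]
    · have hm : 1 ≤ m := by omega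
      obtain ⟨p, t, k, r, s, hfold, hr, hs, hp, hp1, hpt, ht1, hk1, hns, hsk⟩ := ih hm
      have hsplit : PySem.List.pyRange 1 (((m + 1 : Nat) : Int) + 1) 1
          = PySem.List.pyRange 1 ((m : Int) + 1) 1 ++ [(m : Int) + 1] := by
        have : ((m + 1 : Nat) : Int) + 1 = ((m : Int) + 1) + 1 := by push_cast; ring
        rw [this, PySem.List.pyRange_one_succ_right (by omega)]
      rw [hsplit, List.foldl_append, hfold]
      simp only [List.foldl, clasicaStep]
      by_cases hc : p + 1 > t
      · -- wrap: p+1 > t forces r = n+1 (triangular boundary hit)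
        have hreq : r = (m : Int) + 1 := by omega
        rw [if_pos hc]
        refine ⟨1, t + 1, t, r + t + 1, r, rfl, by linear_combination hr, hr,
          by push_cast; omega, le_refl 1, by omega, by omega, by omega,
          by push_cast; omega, by push_cast; omega⟩
      · rw [if_neg hc]
        refine ⟨p + 1, t, t, r, r, rfl, hr, hr, by push_cast; omega, by omega,
          by omega, ht1, by omega, by push_cast; omega, by push_cast; omega⟩

-- Invariant of B's binary search: it keeps T(lo-1) < w ≤ T(hi) and returns the
-- unique boundary index (stated via s with 2*s = res*(res+1), so T(res-1) = s - res).
lemma clasicaLoop_inv (w lo hi : Int) (hlo : 0 ≤ lo) (hle : lo ≤ hi)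
    (hl : lo = 0 ∨ ∃ sl : Int, 2 * sl = lo * (lo + 1) ∧ sl - lo < w)
    (hh : ∃ sh : Int, 2 * sh = hi * (hi + 1) ∧ w ≤ sh) :
    ∃ s : Int, 2 * s = clasicaLoop w lo hi * (clasicaLoop w lo hi + 1) ∧
      w ≤ s ∧ (clasicaLoop w lo hi = 0 ∨ s - clasicaLoop w lo hi < w) ∧
      0 ≤ clasicaLoop w lo hi := by
  induction lo, hi using clasicaLoop.induct (w := w) with
  | case1 lo hi h mid hc ih =>
    have hmid : lo ≤ mid ∧ mid ≤ hi := by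
      have he : PySem.Int.floordiv (lo + hi) 2 = (lo + hi) / 2 :=
        PySem.Int.floordiv_eq_ediv_of_pos (by norm_num)
      constructor <;> omega
    have hmlt : mid < hi := by
      have he : PySem.Int.floordiv (lo + hi) 2 = (lo + hi) / 2 :=
        PySem.Int.floordiv_eq_ediv_of_pos (by norm_num)
      omega
    have hcond : w * 2 ≤ mid * (mid + 1) :=
      (PySem.Int.le_floordiv_iff_mul_le (by norm_num)).mp hc
    obtain ⟨sm, hsm⟩ := (Int.even_mul_succ_self mid).exists_two_nsmul _
    have hsm' : 2 * sm = mid * (mid + 1) := by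
      have := hsm; simpa [two_nsmul, two_mul] using this.symm
    rw [clasicaLoop, dif_pos h, if_pos hc]
    exact ih hlo hmid.1 hl ⟨sm, hsm', by omega⟩
  | case2 lo hi h mid hc ih =>
    have hmid : lo ≤ mid ∧ mid ≤ hi := by
      have he : PySem.Int.floordiv (lo + hi) 2 = (lo + hi) / 2 :=
        PySem.Int.floordiv_eq_ediv_of_pos (by norm_num)
      constructor <;> omega
    have hmlt : mid < hi := by
      have he : PySem.Int.floordiv (lo + hi) 2 = (lo + hi) / 2 :=
        PySem.Int.floordiv_eq_ediv_of_pos (by norm_num)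
      omega
    have hcond : ¬ w * 2 ≤ mid * (mid + 1) := fun hx =>
      hc ((PySem.Int.le_floordiv_iff_mul_le (by norm_num)).mpr hx)
    obtain ⟨sm, hsm⟩ := (Int.even_mul_succ_self mid).exists_two_nsmul _
    have hsm' : 2 * sm = mid * (mid + 1) := by
      have := hsm; simpa [two_nsmul, two_mul] using this.symm
    have hsmw : sm < w := by
      have h1 : mid * (mid + 1) < w * 2 := lt_of_not_ge hcond
      linarith [hsm']
    rw [clasicaLoop, dif_pos h, if_neg hc]
    exact ih (by omega) (by omega)
      (Or.inr ⟨sm + mid + 1, by linear_combination hsm', by omega⟩) hh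
  | case3 lo hi h =>
    have hlh : lo = hi := by omega
    subst hlh
    obtain ⟨sh, hsh, hwsh⟩ := hh
    rw [clasicaLoop, dif_neg h]
    rcases hl with h0 | ⟨sl, hsl, hslw⟩
    · exact ⟨sh, hsh, hwsh, Or.inl h0, hlo⟩
    · have : sl = sh := by omega
      exact ⟨sh, hsh, hwsh, Or.inr (by omega), hlo⟩

-- the boundary index T(a-1) < w ≤ T(a) is unique
lemma tri_uniq (w a b sa sb : Int) (ha0 : 1 ≤ a) (hb0 : 1 ≤ b)
    (h2a : 2 * sa = a * (a + 1)) (h2b : 2 * sb = b * (b + 1))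
    (hwa : w ≤ sa) (haw : sa - a < w) (hwb : w ≤ sb) (hbw : sb - b < w) : a = b := by
  rcases lt_trichotomy a b with h | h | h
  · nlinarith
  · exact h
  · nlinarith

-- ===== VERDICT (by name: the statement is the Claim_ definition above) =====
theorem clasica_spec : Claim_equal_clasica := by
  intro w _
  unfold Spec_clasica clasica_alt
  by_cases hw : 0 < w
  · rw [if_pos hw]
    -- A side
    have hwn : ((w.toNat : Nat) : Int) = w := Int.toNat_of_nonneg (by omega)
    obtain ⟨p, t, k, r, s, hfold, hr, hs, hp, hp1, hpt, ht1, hk1, hns, hsk⟩ :=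
      clasica_fold_inv w.toNat (by omega)
    rw [hwn] at hfold hns hsk
    have hA : clasica w = k := by unfold clasica; rw [hfold]
    -- B side
    obtain ⟨sw, hsw⟩ := (Int.even_mul_succ_self w).exists_two_nsmul _
    have hsw' : 2 * sw = w * (w + 1) := by
      have := hsw; simpa [two_nsmul, two_mul] using this.symm
    obtain ⟨sb, hsb, hwsb, hres, hres0⟩ :=
      clasicaLoop_inv w 0 w (le_refl 0) (by omega) (Or.inl rfl)
        ⟨sw, hsw', by nlinarith⟩
    set b := clasicaLoop w 0 w with hb
    have hbne : b ≠ 0 := by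
      intro h0; rw [h0] at hsb; omega
    have hbrk : sb - b < w := by
      rcases hres with h | h
      · exact absurd h hbne
      · exact h
    rw [hA]
    exact tri_uniq w k b s sb hk1 (by omega) hs hsb hns hsk hwsb hbrk
  · -- w ≤ 0 : A's range is empty, B's search interval is empty; both give 0
    rw [if_neg hw]
    have hA : clasica w = 0 := by
      unfold clasica
      rw [PySem.List.pyRange_one_eq_nil (by omega)]
      rfl
    have hB : clasicaLoop w 0 0 = 0 := by rw [clasicaLoop]; norm_num
    rw [hA, hB]
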